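-- pv_equiv track=rewrite | github.com/KamorionLabs/dashborion | backend/providers/orchestrator/ecs.py | matches_discovery_tags
-- ===== SOURCE A (Python) =====
-- def matches_discovery_tags(resource_tags: list, discovery_tags: dict) -> bool:
--     """
--     Check if a resource's tags match all the discovery tags.
--     resource_tags: List of {'Key': 'x', 'Value': 'y'} or {'key': 'x', 'value': 'y'}
--     discovery_tags: Dict of {tag_key: tag_value} to match
--     Returns True if ALL discovery_tags are present in resource_tags.
--     """
--     if not discovery_tags:
--         return True  # No tags to match = match all
--     if not resource_tags:
--         return False
--
--     # Normalize resource tags to dict (handle both AWS tag formats)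
--     resource_tag_dict = {}
--     for tag in resource_tags:
--         key = tag.get('Key') or tag.get('key')
--         value = tag.get('Value') or tag.get('value')
--         if key:
--             resource_tag_dict[key] = value
--
--     # Check if all discovery tags match
--     for tag_key, tag_value in discovery_tags.items():
--         if resource_tag_dict.get(tag_key) != tag_value:
--             return False
--     return True
-- ===== SOURCE B (Python) =====
-- def _effective_value(resource_tags, tag_key):
--     """Value of the LAST resource tag whose normalized key equals tag_key (None if absent)."""
--     effective = None
--     for tag in resource_tags:
--         key = tag.get('Key') or tag.get('key')
--         if key and key == tag_key:
--             effective = tag.get('Value') or tag.get('value')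
--     return effective
--
--
-- def matches_discovery_tags(resource_tags: list, discovery_tags: dict) -> bool:
--     if not discovery_tags:
--         return True
--     if not resource_tags:
--         return False
--     return all(_effective_value(resource_tags, k) == v for k, v in discovery_tags.items())
-- ===== Notes on version B (the rewrite author's own statement) =====
-- stated objective: alternative
-- what changed: B drops A's intermediate normalized tag dictionary: for each discovery tag it scans resource_tags directly for the last entry whose normalized key matches, trading the built index for per-tag scans.
import Mathlib
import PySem

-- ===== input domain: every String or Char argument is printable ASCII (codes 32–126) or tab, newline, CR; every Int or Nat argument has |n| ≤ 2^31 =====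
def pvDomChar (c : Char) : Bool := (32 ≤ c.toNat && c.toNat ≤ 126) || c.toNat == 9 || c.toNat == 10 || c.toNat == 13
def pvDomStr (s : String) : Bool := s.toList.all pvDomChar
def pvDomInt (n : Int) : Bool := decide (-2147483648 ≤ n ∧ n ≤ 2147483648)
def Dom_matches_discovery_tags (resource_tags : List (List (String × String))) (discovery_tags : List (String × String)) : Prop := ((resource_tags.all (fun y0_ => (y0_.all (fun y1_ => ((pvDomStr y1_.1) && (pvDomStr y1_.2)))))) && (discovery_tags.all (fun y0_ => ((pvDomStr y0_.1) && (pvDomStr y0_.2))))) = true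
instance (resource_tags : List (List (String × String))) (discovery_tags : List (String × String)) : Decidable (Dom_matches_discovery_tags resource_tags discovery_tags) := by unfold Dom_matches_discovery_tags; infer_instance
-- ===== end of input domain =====

-- B replaces A's intermediate normalized tag dictionary by a direct per-discovery-tag scan of
-- resource_tags (last matching normalized entry wins); an alternative decomposition, not faster.


-- Shared helper: Python's `a or b` on two Optional[str] values ('' and None are falsy).
def pvOrStr (a b : Option String) : Option String :=
  match a with
  | some s => if s = "" then b else some s
  | none => b

-- Shared helper: Python truthiness of an Optional[str] (`if key:`).
def pvTruthy (o : Option String) : Bool :=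
  match o with
  | some s => decide (s ≠ "")
  | none => false

-- ===== PORT A =====
-- Body of A's normalization loop: `key = tag.get('Key') or tag.get('key'); value = …; if key: resource_tag_dict[key] = value`.
def pvBuildStep (d : PySem.Dict String (Option String)) (tag : List (String × String)) : PySem.Dict String (Option String) :=
  let t := PySem.Dict.ofList tag
  let key := pvOrStr (t.get? "Key") (t.get? "key")
  let value := pvOrStr (t.get? "Value") (t.get? "value")
  if pvTruthy key then d.insert (key.getD "") value else d

-- A's check loop: `if resource_tag_dict.get(tag_key) != tag_value: return False` … `return True`.
def pvCheckAll (rtd : PySem.Dict String (Option String)) : List (String × String) → Bool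
  | [] => true
  | (k, v) :: rest => if (rtd.get? k).getD none ≠ some v then false else pvCheckAll rtd rest

def matches_discovery_tags (resource_tags : List (List (String × String))) (discovery_tags : List (String × String)) : Bool :=
  if discovery_tags.isEmpty then true
  else if resource_tags.isEmpty then false
  else
    let rtd := resource_tags.foldl pvBuildStep PySem.Dict.empty
    pvCheckAll rtd (PySem.Dict.ofList discovery_tags).items

-- ===== PORT B =====
-- Body of _effective_value's loop: keep the value of the latest tag whose normalized key equals tag_key.
def pvScanStep (tag_key : String) (acc : Option String) (tag : List (String × String)) : Option String :=
  let t := PySem.Dict.ofList tag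
  let key := pvOrStr (t.get? "Key") (t.get? "key")
  if pvTruthy key && (key == some tag_key) then pvOrStr (t.get? "Value") (t.get? "value") else acc

def pvEffVal (resource_tags : List (List (String × String))) (tag_key : String) : Option String :=
  resource_tags.foldl (pvScanStep tag_key) none

def matches_discovery_tags_alt (resource_tags : List (List (String × String))) (discovery_tags : List (String × String)) : Bool :=
  if discovery_tags.isEmpty then true
  else if resource_tags.isEmpty then false
  else (PySem.Dict.ofList discovery_tags).items.all (fun kv => pvEffVal resource_tags kv.1 == some kv.2)

-- ===== PRECONDITION & SPEC =====
def Spec_matches_discovery_tags (resource_tags : List (List (String × String))) (discovery_tags : List (String × String)) (out : Bool) : Prop := out = matches_discovery_tags_alt resource_tags discovery_tags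
instance (resource_tags : List (List (String × String))) (discovery_tags : List (String × String)) (out : Bool) : Decidable (Spec_matches_discovery_tags resource_tags discovery_tags out) := by unfold Spec_matches_discovery_tags; infer_instance

-- ===== CLAIM (what is proved, stated in full; the proofs are below) =====
def Claim_equal_matches_discovery_tags : Prop := ∀ (resource_tags : List (List (String × String))) (discovery_tags : List (String × String)), Dom_matches_discovery_tags resource_tags discovery_tags → Spec_matches_discovery_tags resource_tags discovery_tags (matches_discovery_tags resource_tags discovery_tags)

-- ===== LEMMAS AND PROOFS =====

-- One tag through A's dict-building step, observed at key k, is one tag through B's scan step.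
theorem pv_step (d : PySem.Dict String (Option String)) (tag : List (String × String)) (k : String) :
    ((pvBuildStep d tag).get? k).getD none = pvScanStep k ((d.get? k).getD none) tag := by
  unfold pvBuildStep pvScanStep
  cases hkey : pvOrStr ((PySem.Dict.ofList tag).get? "Key") ((PySem.Dict.ofList tag).get? "key") with
  | none => simp [hkey, pvTruthy]
  | some kk =>
    by_cases hkk : kk = ""
    · simp [hkey, hkk, pvTruthy]
    · by_cases hk : kk = k
      · subst hk
        simp [hkey, pvTruthy, hkk, PySem.Dict.get?_insert_self]
      · simp [hkey, pvTruthy, hkk, hk, PySem.Dict.get?_insert_of_ne _ _ (Ne.symm hk)]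

-- A's built dict, looked up at k, equals B's last-match scan (any starting state).
theorem pv_fold_get (k : String) :
    ∀ (rts : List (List (String × String))) (d : PySem.Dict String (Option String)),
    ((rts.foldl pvBuildStep d).get? k).getD none = rts.foldl (pvScanStep k) ((d.get? k).getD none) := by
  intro rts
  induction rts with
  | nil => intro d; simp
  | cons tag rest ih =>
    intro d
    rw [List.foldl_cons, List.foldl_cons, ih, pv_step]

-- Specialization to A's actual starting state (the empty dict) and B's (None).
theorem pv_get_eq (rts : List (List (String × String))) (k : String) :
    ((rts.foldl pvBuildStep PySem.Dict.empty).get? k).getD none = pvEffVal rts k := by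
  rw [pv_fold_get, pvEffVal]
  simp

-- A's check loop is List.all of the per-key test.
theorem pv_checkAll_eq (rtd : PySem.Dict String (Option String)) :
    ∀ l : List (String × String),
    pvCheckAll rtd l = l.all (fun kv => (rtd.get? kv.1).getD none == some kv.2) := by
  intro l
  induction l with
  | nil => rfl
  | cons kv rest ih =>
    obtain ⟨k, v⟩ := kv
    simp only [pvCheckAll, List.all_cons, ih]
    by_cases h : (rtd.get? k).getD none = some v <;> simp [h]

-- ===== VERDICT (by name: the statement is the Claim_ definition above) =====
theorem matches_discovery_tags_spec : Claim_equal_matches_discovery_tags := by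
  intro rts dts _
  unfold Spec_matches_discovery_tags matches_discovery_tags matches_discovery_tags_alt
  by_cases h1 : dts.isEmpty = true
  · rw [if_pos h1, if_pos h1]
  · rw [if_neg h1, if_neg h1]
    by_cases h2 : rts.isEmpty = true
    · rw [if_pos h2, if_pos h2]
    · rw [if_neg h2, if_neg h2, pv_checkAll_eq]
      simp only [pv_get_eq]
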